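-- pv_equiv track=rewrite | github.com/WING-NUS/SciAssist | src/SciAssist/pipelines/dataset_extraction.py | find_entity_indexes
-- ===== SOURCE A (Python) =====
-- def find_entity_indexes(lst):
--     # {0: 'B-DATA', 1: 'I-DATA', 2: 'O'}
--     indexes = []
--     i = 0
--     for i in range(len(lst)):
--         tmp = []
--         if lst[i] == 0:
--             tmp = [i,i]
--             j = i
--             while j < len(lst):
--                 if j+1 == len(lst) or lst[j+1] != 1:
--                     indexes.append(tmp)
--                     break
--                 else:
--                     j += 1
--                     tmp = [i,j]
--
--     return indexes
-- ===== SOURCE B (Python) =====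
-- def find_entity_indexes(lst):
--     n = len(lst)
--     # backward pass: run[i] = length of the consecutive run of 1s starting at i
--     run = [0] * (n + 1)
--     for i in range(n - 1, -1, -1):
--         run[i] = run[i + 1] + 1 if lst[i] == 1 else 0
--     # forward pass: one span per 0, extending over the run of 1s that follows it
--     return [[i, i + run[i + 1]] for i in range(n) if lst[i] == 0]
-- ===== Notes on version B (the rewrite author's own statement) =====
-- stated objective: alternative
-- what changed: Replaces A's inline forward walk over the 1s following each 0 by a precomputed backward suffix-run table consulted in a single forward pass.
import Mathlib
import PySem

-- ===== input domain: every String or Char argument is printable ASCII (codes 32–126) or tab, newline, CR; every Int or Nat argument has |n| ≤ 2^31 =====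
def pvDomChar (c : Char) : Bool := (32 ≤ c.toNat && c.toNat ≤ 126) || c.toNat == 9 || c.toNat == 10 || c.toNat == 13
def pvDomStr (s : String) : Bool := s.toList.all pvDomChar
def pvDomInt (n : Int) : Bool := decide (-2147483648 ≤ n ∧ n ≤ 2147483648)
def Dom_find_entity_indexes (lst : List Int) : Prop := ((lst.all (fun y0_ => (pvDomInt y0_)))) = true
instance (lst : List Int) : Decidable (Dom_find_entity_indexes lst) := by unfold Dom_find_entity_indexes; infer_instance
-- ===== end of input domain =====

-- B replaces A's inline forward walk over the 1s after each 0 by a backward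
-- suffix-run table consulted in a single forward pass (alternative decomposition).


-- ===== PORT A =====
-- A's inner `while j < len(lst)` loop; fuel bounds the iteration count
-- (the loop always appends `tmp` and breaks before fuel `lst.length + 1` runs out).
-- `none` would mean the while loop finished without appending.
def findEntWhileA (lst : List Int) (i : Int) : Nat → Int → List Int → Option (List Int)
  | 0, _, _ => none
  | fuel + 1, j, tmp =>
      if j < (lst.length : Int) then
        if j + 1 = (lst.length : Int) ∨ PySem.List.pyGet? lst (j + 1) ≠ some 1 then
          some tmp
        else
          findEntWhileA lst i fuel (j + 1) [i, j + 1]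
      else none

def find_entity_indexes (lst : List Int) : List (List Int) :=
  (PySem.List.pyRange 0 (lst.length : Int) 1).foldl
    (fun indexes i =>
      if PySem.List.pyGet? lst i = some 0 then
        match findEntWhileA lst i (lst.length + 1) i [i, i] with
        | some tmp => indexes ++ [tmp]
        | none => indexes
      else indexes) []

-- ===== PORT B =====
-- backward pass: entry k of `runsB lst` = length of the consecutive run of 1s starting at k
def runsB : List Int → List Int
  | [] => []
  | x :: xs =>
      let r := runsB xs
      (if x = 1 then r.headD 0 + 1 else 0) :: r

-- forward pass: `rs` is the run table shifted by one (run lengths at position i+1)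
def forwardB : Int → List Int → List Int → List (List Int)
  | _, [], _ => []
  | i, x :: xs, rs =>
      (if x = 0 then [[i, i + rs.headD 0]] else []) ++ forwardB (i + 1) xs rs.tail

def find_entity_indexes_alt (lst : List Int) : List (List Int) :=
  forwardB 0 lst (runsB lst).tail

-- ===== PRECONDITION & SPEC =====
def Spec_find_entity_indexes (lst : List Int) (out : List (List Int)) : Prop := out = find_entity_indexes_alt lst
instance (lst : List Int) (out : List (List Int)) : Decidable (Spec_find_entity_indexes lst out) := by unfold Spec_find_entity_indexes; infer_instance

-- ===== CLAIM (what is proved, stated in full; the proofs are below) =====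
def Claim_equal_find_entity_indexes : Prop := ∀ (lst : List Int), Dom_find_entity_indexes lst → Spec_find_entity_indexes lst (find_entity_indexes lst)

-- ===== LEMMAS AND PROOFS =====

-- length of the maximal prefix of 1s, as an Int
def run1 (xs : List Int) : Int := ((xs.takeWhile (· == 1)).length : Int)

-- common reference: one span per 0, its end reaching over the following run of 1s
def specF : Int → List Int → List (List Int)
  | _, [] => []
  | i, x :: xs => (if x = 0 then [[i, i + run1 xs]] else []) ++ specF (i + 1) xs

theorem runsB_headD (xs : List Int) : (runsB xs).headD 0 = run1 xs := by
  induction xs with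
  | nil => simp [runsB, run1]
  | cons x xs ih =>
      simp only [runsB, List.headD_cons]
      by_cases hx : x = 1
      · rw [if_pos hx, ih, run1, run1, hx]
        simp
      · have hb : (x == 1) = false := by simp [hx]
        rw [if_neg hx, run1, List.takeWhile_cons, hb]
        simp

theorem forwardB_eq_specF (xs : List Int) (i : Int) :
    forwardB i xs (runsB xs).tail = specF i xs := by
  induction xs generalizing i with
  | nil => simp [forwardB, specF]
  | cons x xs ih =>
      have htail : (runsB (x :: xs)).tail = runsB xs := by simp [runsB]
      rw [htail]
      show (if x = 0 then [[i, i + (runsB xs).headD 0]] else []) ++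
            forwardB (i + 1) xs (runsB xs).tail = _
      rw [runsB_headD, ih]
      rfl

theorem alt_eq_specF (lst : List Int) : find_entity_indexes_alt lst = specF 0 lst := by
  unfold find_entity_indexes_alt
  exact forwardB_eq_specF lst 0

theorem findEntWhileA_eq (lst : List Int) (i : Int) (fuel j : Nat)
    (hj : j < lst.length) (hfuel : lst.length - j ≤ fuel) :
    findEntWhileA lst i fuel (j : Int) [i, (j : Int)] =
      some [i, (j : Int) + run1 (lst.drop (j + 1))] := by
  induction fuel generalizing j with
  | zero => omega
  | succ fuel ih =>
      rw [findEntWhileA]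
      rw [if_pos (by exact_mod_cast hj)]
      by_cases hend : j + 1 = lst.length
      · rw [if_pos (Or.inl (by exact_mod_cast hend))]
        simp [hend, run1]
      · have hlt : j + 1 < lst.length := by omega
        have hget : PySem.List.pyGet? lst ((j : Int) + 1) = some lst[j + 1] := by
          have := PySem.List.pyGet?_ofNat (xs := lst) (n := j + 1) hlt
          simpa using this
        have hdrop : lst.drop (j + 1) = lst[j + 1] :: lst.drop (j + 2) := by
          rw [List.drop_eq_getElem_cons hlt]
        by_cases h1 : lst[j + 1] = 1
        · rw [if_neg]
          · have hcast : ((j : Int) + 1) = ((j + 1 : Nat) : Int) := by push_cast; ring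
            rw [hcast, ih (j + 1) hlt (by omega)]
            have hb : (lst[j + 1] == 1) = true := by simp [h1]
            have hrun : run1 (List.drop (j + 1) lst) = 1 + run1 (List.drop (j + 2) lst) := by
              rw [run1, run1, hdrop, List.takeWhile_cons, hb]
              simp
              omega
            have e2 : j + 1 + 1 = j + 2 := by omega
            rw [e2, hrun]
            simp
            omega
          · simp [hget, h1]
            omega
        · rw [if_pos (Or.inr (by rw [hget]; simp [h1]))]
          rw [hdrop, run1]
          have hb : (lst[j + 1] == 1) = false := by simp [h1]
          rw [List.takeWhile_cons, hb]
          simp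

theorem a_eq_specF_aux (lst : List Int) (k : Nat) (hk : k ≤ lst.length) :
    (PySem.List.pyRange (k : Int) (lst.length : Int) 1).flatMap
      (fun i => if PySem.List.pyGet? lst i = some 0 then
          [[i, i + run1 (lst.drop (i.toNat + 1))]] else []) = specF (k : Int) (lst.drop k) := by
  by_cases h : k = lst.length
  · rw [PySem.List.pyRange_one_eq_nil (by exact_mod_cast h.ge)]
    simp [h, specF]
  · have hk' : k < lst.length := by omega
    rw [PySem.List.pyRange_one_cons (by exact_mod_cast hk')]
    rw [List.flatMap_cons]
    have hdrop : lst.drop k = lst[k] :: lst.drop (k + 1) := by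
      rw [List.drop_eq_getElem_cons hk']
    rw [hdrop]
    show _ = (if lst[k] = 0 then [[(k : Int), (k : Int) + run1 (lst.drop (k + 1))]] else [])
          ++ specF ((k : Int) + 1) (lst.drop (k + 1))
    have hget : PySem.List.pyGet? lst (k : Int) = some lst[k] :=
      PySem.List.pyGet?_ofNat (xs := lst) (n := k) hk'
    have hcast : ((k : Int) + 1) = ((k + 1 : Nat) : Int) := by push_cast; ring
    have hrec := a_eq_specF_aux lst (k + 1) (by omega)
    rw [hcast, hrec]
    congr 1
    rw [hget]
    by_cases h0 : lst[k] = 0 <;> simp [h0]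
  termination_by lst.length - k

theorem a_eq_specF (lst : List Int) : find_entity_indexes lst = specF 0 lst := by
  unfold find_entity_indexes
  have hcong : ∀ (acc : List (List Int)) (i : Int),
      i ∈ PySem.List.pyRange 0 (lst.length : Int) 1 →
      (fun indexes i =>
        if PySem.List.pyGet? lst i = some 0 then
          match findEntWhileA lst i (lst.length + 1) i [i, i] with
          | some tmp => indexes ++ [tmp]
          | none => indexes
        else indexes) acc i =
      (fun indexes i => indexes ++
        (if PySem.List.pyGet? lst i = some 0 then
          [[i, i + run1 (lst.drop (i.toNat + 1))]] else [])) acc i := by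
    intro acc i hi
    rw [PySem.List.mem_pyRange_one] at hi
    obtain ⟨h0, hlen⟩ := hi
    have hnat : i = ((i.toNat : Nat) : Int) := by omega
    have hjlt : i.toNat < lst.length := by omega
    have hw := findEntWhileA_eq lst ((i.toNat : Nat) : Int) (lst.length + 1) i.toNat hjlt
      (by omega)
    simp only
    rw [hnat, hw, Int.toNat_natCast]
    split_ifs with h <;> simp
  refine Eq.trans (PySem.List.foldl_congr_mem _ _ _ _ hcong) ?_
  rw [PySem.List.foldl_append_eq_flatMap]
  rw [List.nil_append]
  have := a_eq_specF_aux lst 0 (Nat.zero_le _)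
  simpa using this

-- ===== VERDICT (by name: the statement is the Claim_ definition above) =====
theorem find_entity_indexes_spec : Claim_equal_find_entity_indexes := by
  intro lst _
  unfold Spec_find_entity_indexes
  rw [a_eq_specF, alt_eq_specF]
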